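-- pv_equiv track=rewrite | github.com/enriquedlh97/algoDS | algosds/problems/patterns/miscellaneous/hash_table/generate_document.py | generate_document_hashtable_original
-- ===== SOURCE A (Python) =====
-- def generate_document_hashtable_original(characters, document):
--     character_counts = {}
--
--     for character in characters:
--         if character not in character_counts:
--             character_counts[character] = 0
--
--         character_counts[character] += 1
--
--     for character in document:
--         if character not in character_counts or character_counts[character] == 0:
--             return False
--
--         character_counts[character] -= 1
--
--     return True
-- ===== SOURCE B (Python) =====
-- def generate_document_hashtable_original(characters, document):
--     doc = list(document)
--     chars = list(characters)
--     return all(doc.count(c) <= chars.count(c) for c in set(doc))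
-- ===== Notes on version B (the rewrite author's own statement) =====
-- stated objective: idiomatic
-- what changed: Replaced the interleaved build-then-decrement-with-early-return loop over a mutable dict by a whole-count comparison: for each distinct document character compare its total count in the document with its count in the characters string.
import Mathlib
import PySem

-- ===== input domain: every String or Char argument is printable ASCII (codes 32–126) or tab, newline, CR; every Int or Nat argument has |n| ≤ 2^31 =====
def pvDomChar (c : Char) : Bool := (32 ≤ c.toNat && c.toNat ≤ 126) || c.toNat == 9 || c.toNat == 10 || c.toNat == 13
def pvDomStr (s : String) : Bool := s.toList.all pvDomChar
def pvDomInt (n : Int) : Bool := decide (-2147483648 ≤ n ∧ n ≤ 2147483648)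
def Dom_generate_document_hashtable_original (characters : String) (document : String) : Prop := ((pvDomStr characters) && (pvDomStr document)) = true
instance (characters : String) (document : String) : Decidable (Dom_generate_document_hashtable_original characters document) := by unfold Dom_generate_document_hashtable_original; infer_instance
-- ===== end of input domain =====

-- B replaces A's build-then-decrement loop with a whole-count comparison per distinct
-- document character (idiomatic restructuring; same asymptotic class, not claimed faster).

-- ===== PORT A =====
-- first loop body: ensure key exists with 0, then += 1
def pvStepBuild (d : PySem.Dict Char Int) (c : Char) : PySem.Dict Char Int :=
  let d' := if d.contains c = false then d.insert c 0 else d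
  d'.insert c (d'.getD c 0 + 1)

-- second loop: early return False when the character is absent or exhausted, else -= 1
def pvLoopA (d : PySem.Dict Char Int) : List Char → Bool
  | [] => true
  | c :: rest =>
    if !d.contains c || d.getD c 0 == 0 then false
    else pvLoopA (d.insert c (d.getD c 0 - 1)) rest

def generate_document_hashtable_original (characters : String) (document : String) : Bool :=
  pvLoopA (characters.toList.foldl pvStepBuild PySem.Dict.empty) document.toList

-- ===== PORT B =====
def generate_document_hashtable_original_alt (characters : String) (document : String) : Bool :=
  let doc := document.toList
  let chars := characters.toList
  (PySem.Set.ofList doc).all (fun c => PySem.List.count doc c ≤ PySem.List.count chars c)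

-- ===== PRECONDITION & SPEC =====
def Spec_generate_document_hashtable_original (characters : String) (document : String) (out : Bool) : Prop := out = generate_document_hashtable_original_alt characters document
instance (characters : String) (document : String) (out : Bool) : Decidable (Spec_generate_document_hashtable_original characters document out) := by unfold Spec_generate_document_hashtable_original; infer_instance

-- ===== CLAIM (what is proved, stated in full; the proofs are below) =====
def Claim_equal_generate_document_hashtable_original : Prop := ∀ (characters : String) (document : String), Dom_generate_document_hashtable_original characters document → Spec_generate_document_hashtable_original characters document (generate_document_hashtable_original characters document)

-- ===== LEMMAS AND PROOFS =====

theorem pvGetD_step (d : PySem.Dict Char Int) (c c' : Char) :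
    (pvStepBuild d c).getD c' 0 = if c' = c then d.getD c' 0 + 1 else d.getD c' 0 := by
  unfold pvStepBuild
  by_cases h : d.contains c = false
  · rw [if_pos h]
    simp only [PySem.Dict.getD_insert]
    split_ifs with h1
    · subst h1; rw [PySem.Dict.getD_of_not_contains d 0 h]
    · rfl
  · rw [if_neg h]
    simp only [PySem.Dict.getD_insert]
    split_ifs with h1
    · subst h1; rfl
    · rfl

theorem pvGetD_build (cs : List Char) (d : PySem.Dict Char Int) (c : Char) :
    (cs.foldl pvStepBuild d).getD c 0 = d.getD c 0 + cs.count c := by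
  induction cs generalizing d with
  | nil => simp
  | cons a t ih =>
    simp only [List.foldl_cons, ih, pvGetD_step, List.count_cons, beq_iff_eq]
    by_cases h : c = a
    · subst h; simp; ring
    · rw [if_neg h, if_neg (fun hh => h hh.symm)]
      push_cast; ring

theorem pvLoopA_iff (l : List Char) (d : PySem.Dict Char Int)
    (hnn : ∀ c, 0 ≤ d.getD c 0) :
    pvLoopA d l = true ↔ ∀ c, (l.count c : Int) ≤ d.getD c 0 := by
  induction l generalizing d with
  | nil =>
    simp only [pvLoopA, true_iff]
    intro c; simpa using hnn c
  | cons c rest ih =>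
    have hcnt : ∀ c' : Char, (((c :: rest).count c' : Int)) = (rest.count c' : Int) + (if c = c' then 1 else 0) := by
      intro c'; rw [List.count_cons]; push_cast; simp [beq_iff_eq]
    unfold pvLoopA
    by_cases hz : d.getD c 0 = 0
    · have hcond : (!d.contains c || d.getD c 0 == 0) = true := by simp [hz]
      rw [hcond, if_pos rfl]
      simp only [Bool.false_eq_true, false_iff]
      intro h
      have h1 := h c
      rw [hcnt c, if_pos rfl] at h1
      have hr : (0:Int) ≤ (rest.count c : Int) := by positivity
      omega
    · have hcontains : d.contains c = true := by
        by_contra h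
        exact hz (PySem.Dict.getD_of_not_contains d 0 (by simpa using h))
      have hcond : (!d.contains c || d.getD c 0 == 0) = false := by simp [hcontains, hz]
      rw [hcond, if_neg (by simp)]
      have hpos : 1 ≤ d.getD c 0 := by have := hnn c; omega
      have hnn' : ∀ c', 0 ≤ (d.insert c (d.getD c 0 - 1)).getD c' 0 := by
        intro c'; rw [PySem.Dict.getD_insert]
        split_ifs with h
        · omega
        · exact hnn c'
      rw [ih _ hnn']
      constructor
      · intro h c'
        have h1 := h c'
        rw [PySem.Dict.getD_insert] at h1
        rw [hcnt c']
        by_cases hc : c' = c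
        · subst hc; rw [if_pos rfl] at h1; rw [if_pos rfl]; omega
        · rw [if_neg hc] at h1; rw [if_neg (fun hh => hc hh.symm)]; omega
      · intro h c'
        have h1 := h c'
        rw [hcnt c'] at h1
        rw [PySem.Dict.getD_insert]
        by_cases hc : c' = c
        · subst hc; rw [if_pos rfl] at h1; rw [if_pos rfl]; omega
        · rw [if_neg (fun hh => hc hh.symm)] at h1; rw [if_neg hc]; omega

-- ===== VERDICT (by name: the statement is the Claim_ definition above) =====
theorem generate_document_hashtable_original_spec : Claim_equal_generate_document_hashtable_original := by
  unfold Claim_equal_generate_document_hashtable_original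
  intro characters document _
  unfold Spec_generate_document_hashtable_original
  unfold generate_document_hashtable_original generate_document_hashtable_original_alt
  set doc := document.toList
  set chars := characters.toList
  have hbuild : ∀ c, (chars.foldl pvStepBuild PySem.Dict.empty).getD c 0 = (chars.count c : Int) := by
    intro c; rw [pvGetD_build]; simp
  have hA : pvLoopA (chars.foldl pvStepBuild PySem.Dict.empty) doc = true ↔
      ∀ c, (doc.count c : Int) ≤ (chars.count c : Int) := by
    rw [pvLoopA_iff _ _ (fun c => by rw [hbuild]; positivity)]
    exact forall_congr' fun c => by rw [hbuild]
  have hB : ((PySem.Set.ofList doc).all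
      (fun c => PySem.List.count doc c ≤ PySem.List.count chars c)) = true ↔
      ∀ c, (doc.count c : Int) ≤ (chars.count c : Int) := by
    simp only [List.all_eq_true, PySem.Set.mem_ofList, PySem.List.count_eq, decide_eq_true_eq]
    constructor
    · intro h c
      by_cases hc : c ∈ doc
      · exact_mod_cast h c hc
      · rw [List.count_eq_zero_of_not_mem hc]
        positivity
    · intro h c _
      exact_mod_cast h c
  rw [Bool.eq_iff_iff, hA, hB]
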